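-- pv_equiv track=rewrite | github.com/shankar0123/netvantage | bgp-analyzer/src/netvantage_bgp/analyzer.py | _parse_as_path
-- ===== SOURCE A (Python) =====
-- def _parse_as_path(as_path_str: str) -> list[int]:
--     """Parse a BGP AS path string into a list of ASNs.
--
--     Handles AS_SET notation (e.g., "{1234,5678}") by flattening.
--     Deduplicates consecutive prepends.
--     """
--     if not as_path_str:
--         return []
--
--     asns: list[int] = []
--     for token in as_path_str.split():
--         # Handle AS_SET: {1234,5678}
--         token = token.strip("{}")
--         for part in token.split(","):
--             part = part.strip()
--             if part.isdigit():
--                 asn = int(part)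
--                 # Deduplicate consecutive prepends.
--                 if not asns or asns[-1] != asn:
--                     asns.append(asn)
--     return asns
-- ===== SOURCE B (Python) =====
-- def _collapse(xs):
--     # second pass: drop each element equal to its predecessor
--     return xs[:1] + [b for a, b in zip(xs, xs[1:]) if a != b]
--
--
-- def _parse_as_path(as_path_str: str) -> list[int]:
--     """Build the flat ASN list in one comprehension pass, then collapse
--     consecutive duplicates in a separate second pass."""
--     flat = [int(part)
--             for token in as_path_str.split()
--             for part in [p.strip() for p in token.strip("{}").split(",")]
--             if part.isdigit()]
--     return _collapse(flat)
-- ===== Notes on version B (the rewrite author's own statement) =====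
-- stated objective: alternative
-- what changed: A interleaves parsing with inline consecutive-dedup in one accumulator-carrying nested loop; B builds the flat ASN list in a single comprehension and collapses consecutive duplicates in a separate zip-with-successor second pass.
import Mathlib
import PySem

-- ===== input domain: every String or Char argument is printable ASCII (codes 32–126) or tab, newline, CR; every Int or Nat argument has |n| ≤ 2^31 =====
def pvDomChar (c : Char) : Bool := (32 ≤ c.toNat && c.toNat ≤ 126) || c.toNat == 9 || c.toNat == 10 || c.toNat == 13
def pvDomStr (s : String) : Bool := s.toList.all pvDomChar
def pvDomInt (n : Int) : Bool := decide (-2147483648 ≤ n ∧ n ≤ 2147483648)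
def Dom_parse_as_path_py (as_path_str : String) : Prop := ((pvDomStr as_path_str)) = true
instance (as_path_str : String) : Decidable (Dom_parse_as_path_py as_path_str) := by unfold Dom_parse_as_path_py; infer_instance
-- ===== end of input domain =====

-- B keeps the identical per-part parsing but splits the work into two passes
-- (flat comprehension, then a separate consecutive-duplicate collapse) — objective: alternative decomposition.

-- ===== PORT A =====
def parse_as_path_py (as_path_str : String) : List Int :=
  if as_path_str = "" then []
  else
    (PySem.Str.split₀ as_path_str).foldl (fun asns token =>
      let token := PySem.Str.stripChars token "{}"
      -- sep "," is nonempty, so split? cannot be none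
      ((PySem.Str.split? token ",").getD []).foldl (fun asns part =>
        let part := PySem.Str.strip part
        if PySem.Str.strIsdigit part then
          let asn := (PySem.Int.ofStr? part).getD 0   -- isdigit holds, so int(part) cannot raise on the ASCII domain
          if asns.isEmpty || !(asns.getLast? == some asn) then asns ++ [asn] else asns
        else asns) asns) []

-- ===== PORT B =====
-- xs[:1] + [b for a, b in zip(xs, xs[1:]) if a != b]
def pvCollapse (xs : List Int) : List Int :=
  PySem.List.slice xs none (some 1) ++
    ((xs.zip (PySem.List.slice xs (some 1) none)).filter (fun p => !(p.1 == p.2))).map Prod.snd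

def parse_as_path_py_alt (as_path_str : String) : List Int :=
  pvCollapse <|
    (PySem.Str.split₀ as_path_str).flatMap (fun token =>
      (((((PySem.Str.split? (PySem.Str.stripChars token "{}") ",").getD []).map
          (fun p => PySem.Str.strip p)).filter
          (fun part => PySem.Str.strIsdigit part)).map
          (fun part => (PySem.Int.ofStr? part).getD 0)))

-- ===== PRECONDITION & SPEC =====
def Spec_parse_as_path_py (as_path_str : String) (out : List Int) : Prop := out = parse_as_path_py_alt as_path_str
instance (as_path_str : String) (out : List Int) : Decidable (Spec_parse_as_path_py as_path_str out) := by unfold Spec_parse_as_path_py; infer_instance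

-- ===== CLAIM (what is proved, stated in full; the proofs are below) =====
def Claim_equal_parse_as_path_py : Prop := ∀ (as_path_str : String), Dom_parse_as_path_py as_path_str → Spec_parse_as_path_py as_path_str (parse_as_path_py as_path_str)

-- ===== LEMMAS AND PROOFS =====

-- A's dedup-append step, isolated for the proofs.
def pvAdd1 (acc : List Int) (y : Int) : List Int :=
  if acc.isEmpty || !(acc.getLast? == some y) then acc ++ [y] else acc

-- the tail of the collapse after a last-seen element a
def pvRest (a : Int) : List Int → List Int
  | [] => []
  | x :: t => if a == x then pvRest a t else x :: pvRest x t

theorem pvRest_eq_zip (a : Int) (t : List Int) :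
    pvRest a t = ((List.zip (a :: t) t).filter (fun p => !(p.1 == p.2))).map Prod.snd := by
  induction t generalizing a with
  | nil => simp [pvRest]
  | cons y t ih =>
    by_cases h : a = y <;> simp [pvRest, h, List.zip, ih y]

theorem pvFoldl_add1 (xs : List Int) (acc : List Int) (a : Int) (h : acc.getLast? = some a) :
    xs.foldl pvAdd1 acc = acc ++ pvRest a xs := by
  induction xs generalizing acc a with
  | nil => simp [pvRest]
  | cons x t ih =>
    have hne : acc.isEmpty = false := by
      cases acc with
      | nil => simp at h
      | cons _ _ => rfl
    by_cases hx : a = x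
    · have : pvAdd1 acc x = acc := by
        simp [pvAdd1, hne, h, hx]
      simp only [List.foldl_cons, this, pvRest, hx]
      simpa using ih acc x (hx ▸ h)
    · have hstep : pvAdd1 acc x = acc ++ [x] := by
        simp [pvAdd1, hne, h, hx]
      have hlast : (acc ++ [x]).getLast? = some x := by simp
      simp only [List.foldl_cons, hstep]
      rw [ih (acc ++ [x]) x hlast, pvRest, if_neg (by simpa using hx)]
      simp

theorem pvFoldl_add1_nil (xs : List Int) : xs.foldl pvAdd1 [] = pvCollapse xs := by
  cases xs with
  | nil => simp [pvCollapse, PySem.List.slice]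
  | cons x t =>
    have h1 : pvAdd1 [] x = [x] := by simp [pvAdd1]
    have h2 : PySem.List.slice (x :: t) none (some 1) = [x] := by
      simp [PySem.List.slice]
    have h3 : PySem.List.slice (x :: t) (some 1) none = t := by
      simp [PySem.List.slice]
    simp only [List.foldl_cons, h1, pvCollapse, h2, h3]
    rw [pvFoldl_add1 t [x] x (by simp)]
    rw [pvRest_eq_zip]

-- outer loop over tokens = one fold over the flattened list
theorem pvFoldl_flatMap (g : String → List Int) (ts : List String) (acc : List Int) :
    ts.foldl (fun acc t => (g t).foldl pvAdd1 acc) acc = (ts.flatMap g).foldl pvAdd1 acc := by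
  induction ts generalizing acc with
  | nil => rfl
  | cons t ts ih => simp [List.flatMap_cons, List.foldl_append, ih]

-- the per-token parsed list, shared shape of both sides
def pvParts (token : String) : List Int :=
  (((((PySem.Str.split? (PySem.Str.stripChars token "{}") ",").getD []).map
      (fun p => PySem.Str.strip p)).filter
      (fun part => PySem.Str.strIsdigit part)).map
      (fun part => (PySem.Int.ofStr? part).getD 0))

theorem pvInner_eq (token : String) (acc : List Int) :
    ((PySem.Str.split? (PySem.Str.stripChars token "{}") ",").getD []).foldl (fun asns part =>
        let part := PySem.Str.strip part
        if PySem.Str.strIsdigit part then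
          let asn := (PySem.Int.ofStr? part).getD 0
          if asns.isEmpty || !(asns.getLast? == some asn) then asns ++ [asn] else asns
        else asns) acc
      = (pvParts token).foldl pvAdd1 acc := by
  simp only [pvParts, List.filter_map, List.foldl_map, PySem.List.foldl_if_eq_foldl_filter,
    pvAdd1]
  rfl

-- ===== VERDICT (by name: the statement is the Claim_ definition above) =====
theorem parse_as_path_py_spec : Claim_equal_parse_as_path_py := by
  intro s _
  unfold Spec_parse_as_path_py parse_as_path_py parse_as_path_py_alt
  by_cases hs : s = ""
  · subst hs
    rfl
  · rw [if_neg hs]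
    calc (PySem.Str.split₀ s).foldl (fun asns token =>
          let token := PySem.Str.stripChars token "{}"
          ((PySem.Str.split? token ",").getD []).foldl (fun asns part =>
            let part := PySem.Str.strip part
            if PySem.Str.strIsdigit part then
              let asn := (PySem.Int.ofStr? part).getD 0
              if asns.isEmpty || !(asns.getLast? == some asn) then asns ++ [asn] else asns
            else asns) asns) []
        = (PySem.Str.split₀ s).foldl (fun acc t => (pvParts t).foldl pvAdd1 acc) [] :=
          PySem.List.foldl_congr_mem _ _ _ _ (fun acc t _ => pvInner_eq t acc)
      _ = ((PySem.Str.split₀ s).flatMap pvParts).foldl pvAdd1 [] := pvFoldl_flatMap pvParts _ []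
      _ = pvCollapse ((PySem.Str.split₀ s).flatMap pvParts) := pvFoldl_add1_nil _
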